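-- pv_equiv track=rewrite | github.com/grapheneaffiliate/h4-polytopic-attention | solve_arc8.py | solve_1190e5a7
-- ===== SOURCE A (Python) =====
-- def solve_1190e5a7(grid):
--     rows = len(grid)
--     cols = len(grid[0])
--
--     # Find separator value
--     sep = None
--     for r in range(rows):
--         if len(set(grid[r])) == 1:
--             sep = grid[r][0]
--             break
--
--     bg = None
--     for r in range(rows):
--         for c in range(cols):
--             if grid[r][c] != sep:
--                 bg = grid[r][c]
--                 break
--         if bg is not None:
--             break
--
--     # Find separator rows
--     sep_rows = []
--     for r in range(rows):
--         if all(grid[r][c] == sep for c in range(cols)):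
--             sep_rows.append(r)
--
--     # Find separator cols
--     sep_cols = []
--     for c in range(cols):
--         if all(grid[r][c] == sep for r in range(rows)):
--             sep_cols.append(c)
--
--     # Count row-bands and col-bands
--     all_rows = sorted(set([-1] + sep_rows + [rows]))
--     all_cols = sorted(set([-1] + sep_cols + [cols]))
--
--     n_row_bands = 0
--     for i in range(len(all_rows)-1):
--         gap = all_rows[i+1] - all_rows[i] - 1
--         if gap > 0:
--             n_row_bands += 1
--
--     n_col_bands = 0
--     for i in range(len(all_cols)-1):
--         gap = all_cols[i+1] - all_cols[i] - 1
--         if gap > 0: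
--             n_col_bands += 1
--
--     return [[bg] * n_col_bands for _ in range(n_row_bands)]
-- ===== SOURCE B (Python) =====
-- def solve_1190e5a7(grid):
--     cols = len(grid[0])
--     sep = next((row[0] for row in grid if len(set(row)) == 1), None)
--     bg = next((row[c] for row in grid for c in range(cols) if row[c] != sep), None)
--
--     row_is_sep = [all(row[c] == sep for c in range(cols)) for row in grid]
--     col_is_sep = [all(row[c] == sep for row in grid) for c in range(cols)]
--
--     def count_bands(flags):
--         n, prev = 0, True
--         for is_sep in flags:
--             if prev and not is_sep:
--                 n += 1
--             prev = is_sep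
--         return n
--
--     return [[bg] * count_bands(col_is_sep) for _ in range(count_bands(row_is_sep))]
-- ===== Notes on version B (the rewrite author's own statement) =====
-- stated objective: simpler
-- what changed: Replaces A's separator-index lists plus sorted(set(...)) gap counting with per-axis separator-flag lists and a single run-length pass counting separator-to-band transitions; Pre_ excludes the empty grid (A raises IndexError) and ragged grids with a row shorter than the first row, where A raises IndexError unless its short-circuiting happens to skip every missing cell (a value-dependent accident; B reads the same cells and does the same there).
-- outside the precondition, e.g. on solve_1190e5a7([[1, 0, 2], [2, 0], [0, 0, 0]]): A returns [[1, 1]], B returns [[1, 1]]; on solve_1190e5a7([[1, 1, 1], [2, 0]]): A raises IndexError, B raises IndexError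
import Mathlib
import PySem

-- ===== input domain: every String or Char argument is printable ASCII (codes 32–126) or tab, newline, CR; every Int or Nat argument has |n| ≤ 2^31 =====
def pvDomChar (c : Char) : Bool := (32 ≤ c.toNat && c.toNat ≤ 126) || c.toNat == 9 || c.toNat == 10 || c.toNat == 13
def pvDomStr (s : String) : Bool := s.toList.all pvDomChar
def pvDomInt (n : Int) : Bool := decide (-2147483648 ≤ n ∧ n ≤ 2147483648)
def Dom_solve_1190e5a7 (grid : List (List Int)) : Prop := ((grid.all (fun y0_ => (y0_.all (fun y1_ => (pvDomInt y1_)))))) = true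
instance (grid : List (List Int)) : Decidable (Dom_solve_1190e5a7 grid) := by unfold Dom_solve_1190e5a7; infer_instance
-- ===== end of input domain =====

-- B replaces A's separator-index lists + sorted(set) gap counting by per-axis separator-flag
-- lists and one run-length transition count per axis (simpler, same result).

-- ===== PORT A =====
-- shared helper: BOTH Pythons find the separator value by the same code
-- (first row whose set of values is a singleton; its first element).
def pvFindSep : List (List Int) → Option Int
  | [] => none
  | row :: rest =>
    if (PySem.Set.ofList row).length = 1 then some row.headI else pvFindSep rest

-- inner bg loop of A: for c in range(cols): if grid[r][c] != sep: take it and break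
-- (row.getD c 0 stands for grid[r][c]; Pre_ keeps every index in range, so the default is never read)
def pvBgRow (sep : Option Int) (row : List Int) : List Nat → Option Int
  | [] => none
  | c :: cs =>
    let v := row.getD c 0
    if (some v == sep) = false then some v else pvBgRow sep row cs

-- outer bg loop of A (breaks at the first row that yields a cell ≠ sep)
def pvBgGrid (sep : Option Int) (cols : Nat) : List (List Int) → Option Int
  | [] => none
  | row :: rest =>
    match pvBgRow sep row (List.range cols) with
    | some v => some v
    | none => pvBgGrid sep cols rest

-- A's gap-counting loop over adjacent pairs of all_rows / all_cols
def pvGapCount : List Int → Int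
  | a :: b :: t => (if b - a - 1 > 0 then 1 else 0) + pvGapCount (b :: t)
  | _ => 0

def solve_1190e5a7 (grid : List (List Int)) : List (List Int) :=
  let rows := grid.length
  let cols := grid.headI.length          -- len(grid[0]); grid ≠ [] under Pre_
  let sep := pvFindSep grid
  let bg := pvBgGrid sep cols grid
  let sepRows : List Int :=
    ((List.range rows).filter (fun r =>
      (List.range cols).all (fun c => some ((grid.getD r []).getD c 0) == sep))).map Int.ofNat
  let sepCols : List Int :=
    ((List.range cols).filter (fun c =>
      (List.range rows).all (fun r => some ((grid.getD r []).getD c 0) == sep))).map Int.ofNat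
  let allRows := PySem.List.sorted (PySem.Set.ofList ((-1) :: (sepRows ++ [(rows : Int)]))) (fun x => x)
  let allCols := PySem.List.sorted (PySem.Set.ofList ((-1) :: (sepCols ++ [(cols : Int)]))) (fun x => x)
  let nRowBands := pvGapCount allRows
  let nColBands := pvGapCount allCols
  -- [[bg]*n_col_bands for _ in range(n_row_bands)]; bg is an int whenever a cell is emitted
  (PySem.List.pyRange 0 nRowBands).map (fun _ => List.replicate nColBands.toNat (bg.getD 0))

-- ===== PORT B =====
-- B's count_bands: one pass over a flag list, counting separator→band transitions
-- (state: count, previous-was-separator)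
def pvCountBands (flags : List Bool) : Int :=
  (flags.foldl (fun st f => (if st.2 && !f then st.1 + 1 else st.1, f)) ((0 : Int), true)).1

def solve_1190e5a7_alt (grid : List (List Int)) : List (List Int) :=
  let cols := grid.headI.length
  let sep := pvFindSep grid
  -- next((row[c] for row in grid for c in range(cols) if row[c] != sep), None)
  let bg := ((grid.flatMap (fun row => (List.range cols).map (fun c => row.getD c 0))).find?
      (fun v => !(some v == sep))).getD 0
  let rowIsSep := grid.map (fun row => (List.range cols).all (fun c => some (row.getD c 0) == sep))
  let colIsSep := (List.range cols).map (fun c => grid.all (fun row => some (row.getD c 0) == sep))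
  List.replicate (pvCountBands rowIsSep).toNat (List.replicate (pvCountBands colIsSep).toNat bg)

-- ===== PRECONDITION & SPEC =====
-- Pre_ excludes the empty grid (A raises IndexError on grid[0]) and ragged grids with a row
-- shorter than the first row, where A raises IndexError unless its short-circuiting happens to
-- skip every missing cell — a value-dependent accident with no closed form (B reads the same
-- cells and behaves the same there).
def Pre_solve_1190e5a7 (grid : List (List Int)) : Prop :=
  grid ≠ [] ∧ ∀ row ∈ grid, grid.headI.length ≤ row.length
instance (grid : List (List Int)) : Decidable (Pre_solve_1190e5a7 grid) := by
  unfold Pre_solve_1190e5a7; infer_instance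

def pvWitness_solve_1190e5a7 : List (List Int) := [[1, 1], [0, 1]]

def Spec_solve_1190e5a7 (grid : List (List Int)) (out : List (List Int)) : Prop := out = solve_1190e5a7_alt grid
instance (grid : List (List Int)) (out : List (List Int)) : Decidable (Spec_solve_1190e5a7 grid out) := by unfold Spec_solve_1190e5a7; infer_instance

-- ===== CLAIM (what is proved, stated in full; the proofs are below) =====
def Claim_equal_solve_1190e5a7 : Prop := ∀ (grid : List (List Int)), Dom_solve_1190e5a7 grid → Pre_solve_1190e5a7 grid → Spec_solve_1190e5a7 grid (solve_1190e5a7 grid)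

-- ===== LEMMAS AND PROOFS =====

-- indices (as Ints, counted from offset s) of the true flags
def pvIdxTrue (s : Int) : List Bool → List Int
  | [] => []
  | b :: t => if b then s :: pvIdxTrue (s + 1) t else pvIdxTrue (s + 1) t

-- run-length transition counter as a structural recursion
def pvRunRec : Bool → List Bool → Int
  | _, [] => 0
  | prev, b :: t => (if prev && !b then 1 else 0) + pvRunRec b t

lemma pv_take_map {α : Type} (l : List α) (d : α) (n : Nat) (h : n ≤ l.length) :
    (List.range n).map (fun i => l.getD i d) = l.take n := by
  apply List.ext_getElem
  · simp [h]
  · intro i h1 h2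
    simp at h1
    simp [List.getD_eq_getElem?_getD, List.getElem?_eq_getElem (by omega : i < l.length)]

lemma pv_allRows_eq (l : List (List Int)) (q : List Int → Bool) :
    (List.range l.length).all (fun r => q (l.getD r [])) = l.all q := by
  calc (List.range l.length).all (fun r => q (l.getD r []))
      = ((List.range l.length).map (fun i => l.getD i [])).all q := by
        rw [List.all_map]; rfl
    _ = (l.take l.length).all q := by rw [pv_take_map l [] l.length le_rfl]
    _ = l.all q := by rw [List.take_length]

lemma pv_mapRows_eq (l : List (List Int)) (q : List Int → Bool) :
    (List.range l.length).map (fun r => q (l.getD r [])) = l.map q := by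
  calc (List.range l.length).map (fun r => q (l.getD r []))
      = ((List.range l.length).map (fun i => l.getD i [])).map q := by
        rw [List.map_map]; rfl
    _ = (l.take l.length).map q := by rw [pv_take_map l [] l.length le_rfl]
    _ = l.map q := by rw [List.take_length]

lemma pv_idx_of_range' : ∀ (n s : Nat) (g : Nat → Bool),
    ((List.range' s n).filter g).map Int.ofNat = pvIdxTrue (s : Int) ((List.range' s n).map g) := by
  intro n
  induction n with
  | zero => intro s g; simp [pvIdxTrue]
  | succ n ih =>
    intro s g
    rw [List.range'_succ, List.map_cons]
    by_cases hg : g s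
    · rw [List.filter_cons_of_pos hg, List.map_cons, ih (s + 1) g]
      simp only [pvIdxTrue, hg, if_true]
      push_cast
      simp
    · rw [List.filter_cons_of_neg (by simp [hg]), ih (s + 1) g]
      simp only [pvIdxTrue, hg]
      push_cast
      simp

lemma pv_idxTrue_mem : ∀ (fl : List Bool) (s x : Int), x ∈ pvIdxTrue s fl → s ≤ x ∧ x < s + fl.length := by
  intro fl
  induction fl with
  | nil => intro s x hx; simp [pvIdxTrue] at hx
  | cons b t ih =>
    intro s x hx
    simp only [pvIdxTrue] at hx
    by_cases hb : b
    · simp [hb] at hx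
      rcases hx with h | h
      · subst h; simp only [List.length_cons]; omega
      · have := ih (s + 1) x h; simp only [List.length_cons]; omega
    · simp [hb] at hx
      have := ih (s + 1) x hx; simp only [List.length_cons]; omega

lemma pv_idxTrue_pairwise : ∀ (fl : List Bool) (s : Int), (pvIdxTrue s fl).Pairwise (· < ·) := by
  intro fl
  induction fl with
  | nil => intro s; simp [pvIdxTrue]
  | cons b t ih =>
    intro s
    simp only [pvIdxTrue]
    by_cases hb : b
    · simp only [hb, if_pos]
      refine List.pairwise_cons.2 ⟨fun x hx => ?_, ih (s + 1)⟩
      have := pv_idxTrue_mem t (s + 1) x hx; omega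
    · simpa [hb] using ih (s + 1)

lemma pv_gap_run : ∀ (fl : List Bool) (i p : Int), p < i →
    pvGapCount (p :: (pvIdxTrue i fl ++ [i + fl.length])) =
      pvRunRec (decide (p = i - 1)) fl + (if p = i - 1 then 0 else 1) := by
  intro fl
  induction fl with
  | nil =>
    intro i p hpi
    simp only [pvIdxTrue, List.nil_append, List.length_nil, Nat.cast_zero, add_zero]
    simp only [pvGapCount, pvRunRec]
    split_ifs <;> omega
  | cons b t ih =>
    intro i p hpi
    by_cases hb : b
    · subst hb
      simp only [pvIdxTrue, if_pos, List.cons_append, List.length_cons]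
      have harith : i + ((t.length + 1 : Nat) : Int) = (i + 1) + t.length := by push_cast; ring
      rw [harith]
      show (if i - p - 1 > 0 then 1 else 0) +
          pvGapCount (i :: (pvIdxTrue (i + 1) t ++ [(i + 1) + t.length])) = _
      rw [ih (i + 1) i (by omega)]
      have h1 : (i = (i + 1) - 1) := by omega
      simp only [if_pos h1, decide_eq_true h1]
      simp only [pvRunRec, Bool.not_true, Bool.and_false, if_neg Bool.false_ne_true]
      by_cases hp : p = i - 1
      · rw [if_neg (by omega : ¬ (i - p - 1 > 0)), if_pos hp]
        ring
      · rw [if_pos (by omega : i - p - 1 > 0), if_neg hp]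
        ring
    · have hb' : b = false := by simpa using hb
      subst hb'
      simp only [pvIdxTrue, Bool.false_eq_true, if_neg, not_false_iff, List.length_cons]
      have harith : i + ((t.length + 1 : Nat) : Int) = (i + 1) + t.length := by push_cast; ring
      rw [harith, ih (i + 1) p (by omega)]
      have h2 : ¬ (p = (i + 1) - 1) := by omega
      simp only [if_neg h2, decide_eq_false h2]
      simp only [pvRunRec, Bool.not_false, Bool.and_true]
      by_cases hp : p = i - 1
      · rw [if_pos (by simp [hp]), if_pos hp]
        ring
      · rw [if_neg (by simp [hp]), if_neg hp]
        ring

lemma pv_countBands_fold : ∀ (flags : List Bool) (prev : Bool) (acc : Int),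
    (flags.foldl (fun st f => (if st.2 && !f then st.1 + 1 else st.1, f)) (acc, prev)).1 =
      acc + pvRunRec prev flags := by
  intro flags
  induction flags with
  | nil => intro prev acc; simp [pvRunRec]
  | cons f t ih =>
    intro prev acc
    simp only [List.foldl_cons, pvRunRec, ih]
    split_ifs <;> simp_all <;> ring

-- B's fold equals the structural run counter
lemma pv_countBands_eq (flags : List Bool) : pvCountBands flags = pvRunRec true flags := by
  unfold pvCountBands
  rw [pv_countBands_fold]
  ring

-- the counting fact: A's gap count over sorted(set(-1 :: true-indices ++ [n])) is B's run count
lemma pv_core (fl : List Bool) :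
    pvGapCount (PySem.List.sorted (PySem.Set.ofList ((-1) :: (pvIdxTrue 0 fl ++ [(fl.length : Int)]))) (fun x => x)) =
      pvRunRec true fl := by
  have hmem := pv_idxTrue_mem fl 0
  have hpw : ((-1 : Int) :: (pvIdxTrue 0 fl ++ [(fl.length : Int)])).Pairwise (· < ·) := by
    refine List.pairwise_cons.2 ⟨?_, ?_⟩
    · intro x hx
      rcases List.mem_append.1 hx with h | h
      · have := hmem x h; omega
      · simp at h; omega
    · refine List.pairwise_append.2 ⟨pv_idxTrue_pairwise fl 0, by simp, ?_⟩
      intro x hx y hy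
      simp at hy; subst hy
      have := hmem x hx; omega
  have hnd : ((-1 : Int) :: (pvIdxTrue 0 fl ++ [(fl.length : Int)])).Nodup :=
    hpw.imp (fun h => ne_of_lt h)
  rw [PySem.List.sorted_eq_of_perm_of_pairwise_lt _ _ _
        (by rw [PySem.Set.ofList_eq_self_of_nodup _ hnd]) hpw]
  have h0 : ((fl.length : Nat) : Int) = 0 + (fl.length : Int) := by ring
  rw [h0, pv_gap_run fl 0 (-1) (by omega)]
  norm_num

-- bg: A's double loop with breaks = B's find? over the flattened index-read cells
lemma pv_bgRow_eq' (sep : Option Int) (row : List Int) :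
    ∀ (n s : Nat), s + n ≤ row.length →
      pvBgRow sep row (List.range' s n) =
        ((row.drop s).take n).find? (fun v => !(some v == sep)) := by
  intro n
  induction n with
  | zero => intro s h; simp [pvBgRow]
  | succ n ih =>
    intro s h
    have hs : s < row.length := by omega
    rw [List.range'_succ]
    have hdrop : row.drop s = row[s] :: row.drop (s + 1) := List.drop_eq_getElem_cons hs
    rw [hdrop]
    show (if (some (row.getD s 0) == sep) = false then some (row.getD s 0)
            else pvBgRow sep row (List.range' (s + 1) n)) = _
    have hget : row.getD s 0 = row[s] := by
      simp [List.getD_eq_getElem?_getD, List.getElem?_eq_getElem hs]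
    rw [hget, List.take_succ_cons]
    by_cases hv : (some row[s] == sep) = false
    · rw [if_pos hv, List.find?_cons_of_pos (by simp [hv])]
    · have hv' : (some row[s] == sep) = true := by simpa using hv
      rw [if_neg (by simp [hv']), List.find?_cons_of_neg (by simp [hv']),
        ih (s + 1) (by omega)]

lemma pv_bgGrid_eq (sep : Option Int) (cols : Nat) :
    ∀ (g : List (List Int)), (∀ row ∈ g, cols ≤ row.length) →
      pvBgGrid sep cols g =
        (g.flatMap (fun row => (List.range cols).map (fun c => row.getD c 0))).find?
          (fun v => !(some v == sep)) := by
  intro g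
  induction g with
  | nil => intro _; simp [pvBgGrid]
  | cons row rest ih =>
    intro hlen
    have hrow : cols ≤ row.length := hlen row (by simp)
    have h1 : pvBgRow sep row (List.range cols)
        = ((List.range cols).map (fun c => row.getD c 0)).find? (fun v => !(some v == sep)) := by
      rw [pv_take_map row 0 cols hrow, List.range_eq_range',
        pv_bgRow_eq' sep row cols 0 (by omega)]
      simp
    simp only [List.flatMap_cons, List.find?_append, pvBgGrid, h1]
    rw [ih (fun r hr => hlen r (by simp [hr]))]
    cases (((List.range cols).map (fun c => row.getD c 0)).find? (fun v => !(some v == sep))) <;>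
      simp [Option.or]

-- row bands: A's sorted-set gap count = B's run count over the row flags
lemma pv_rows_eq (grid : List (List Int)) (sep : Option Int) :
    pvGapCount (PySem.List.sorted (PySem.Set.ofList ((-1) ::
        (((List.range grid.length).filter (fun r =>
            (List.range grid.headI.length).all (fun c => some ((grid.getD r []).getD c 0) == sep))).map Int.ofNat
          ++ [(grid.length : Int)]))) (fun x => x))
      = pvCountBands (grid.map (fun row =>
          (List.range grid.headI.length).all (fun c => some (row.getD c 0) == sep))) := by
  set cols := grid.headI.length
  set q : List Int → Bool := fun row => (List.range cols).all (fun c => some (row.getD c 0) == sep)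
  have hidx : ((List.range grid.length).filter (fun r => q (grid.getD r []))).map Int.ofNat
      = pvIdxTrue 0 (grid.map q) := by
    rw [List.range_eq_range', pv_idx_of_range' grid.length 0 (fun r => q (grid.getD r [])),
      ← List.range_eq_range', pv_mapRows_eq grid q]
    norm_num
  rw [hidx, pv_countBands_eq]
  have hL : (grid.length : Int) = ((grid.map q).length : Int) := by simp
  rw [hL]
  exact pv_core (grid.map q)

-- column bands: A's sorted-set gap count = B's run count over the column flags
lemma pv_cols_eq (grid : List (List Int)) (sep : Option Int) :
    pvGapCount (PySem.List.sorted (PySem.Set.ofList ((-1) ::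
        (((List.range grid.headI.length).filter (fun c =>
            (List.range grid.length).all (fun r => some ((grid.getD r []).getD c 0) == sep))).map Int.ofNat
          ++ [(grid.headI.length : Int)]))) (fun x => x))
      = pvCountBands ((List.range grid.headI.length).map (fun c =>
          grid.all (fun row => some (row.getD c 0) == sep))) := by
  set cols := grid.headI.length
  set gC : Nat → Bool := fun c => (List.range grid.length).all (fun r => some ((grid.getD r []).getD c 0) == sep) with hgC
  have hflags : (List.range cols).map (fun c => grid.all (fun row => some (row.getD c 0) == sep))
      = (List.range cols).map gC := by
    apply List.map_congr_left
    intro c _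
    exact (pv_allRows_eq grid (fun row => some (row.getD c 0) == sep)).symm
  have hidx : ((List.range cols).filter gC).map Int.ofNat = pvIdxTrue 0 ((List.range cols).map gC) := by
    rw [List.range_eq_range', pv_idx_of_range' cols 0 gC, ← List.range_eq_range']
    norm_num
  rw [hidx, pv_countBands_eq, hflags]
  have hL : (cols : Int) = (((List.range cols).map gC).length : Int) := by simp
  rw [hL]
  exact pv_core ((List.range cols).map gC)

-- A's output comprehension over range(n) of a constant is replicate n.toNat
lemma pv_pyRange_map_const (n : Int) (x : List Int) :
    (PySem.List.pyRange 0 n).map (fun _ => x) = List.replicate n.toNat x := by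
  by_cases hn : n ≤ 0
  · have h1 : PySem.List.pyRange 0 n = [] := by simp [PySem.List.pyRange]; omega
    have h2 : n.toNat = 0 := by omega
    simp [h1, h2]
  · have h3 : n = (n.toNat : Int) := by omega
    rw [h3, PySem.List.pyRange_zero_natCast, List.map_map]
    rw [show ((fun _ : Int => x) ∘ fun k : Nat => ((k : Int))) = (fun _ : Nat => x) from rfl]
    rw [List.map_const', List.length_range]
    simp
    omega

-- ===== VERDICT (by name: the statement is the Claim_ definition above) =====
theorem solve_1190e5a7_spec : Claim_equal_solve_1190e5a7 := by
  intro grid _ hpre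
  obtain ⟨hne, hlen⟩ := hpre
  unfold Spec_solve_1190e5a7
  simp only [solve_1190e5a7, solve_1190e5a7_alt]
  rw [pv_bgGrid_eq (pvFindSep grid) grid.headI.length grid hlen,
    pv_rows_eq grid (pvFindSep grid),
    pv_cols_eq grid (pvFindSep grid),
    pv_pyRange_map_const]
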